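-- pv_equiv track=rewrite | github.com/ringsaturn/tzfpy | docs/DATA_CLEAN_2026-03-14/analyze_cleanup_candidates.py | aggregate_from_installer_downloads
-- ===== SOURCE A (Python) =====
-- IGNORED_INSTALLERS = {"browser", "unknown"}
--
-- def aggregate_from_installer_downloads(
--     downloads_by_installer: dict[str, dict[str, int]],
-- ) -> tuple[dict[str, int], dict[str, int], dict[str, int], dict[str, int], dict[str, int]]:
--     downloads_all: dict[str, int] = {}
--     downloads_pip: dict[str, int] = {}
--     downloads_uv: dict[str, int] = {}
--     downloads_excluded_browser: dict[str, int] = {}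
--     downloads_excluded_unknown: dict[str, int] = {}
--
--     for filename, installer_map in downloads_by_installer.items():
--         filtered = {
--             name: value
--             for name, value in installer_map.items()
--             if name.lower() not in IGNORED_INSTALLERS
--         }
--         downloads_all[filename] = sum(filtered.values())
--         downloads_pip[filename] = filtered.get("pip", 0)
--         downloads_uv[filename] = filtered.get("uv", 0)
--         downloads_excluded_browser[filename] = sum(
--             value for name, value in installer_map.items() if name.lower() == "browser"
--         )
--         downloads_excluded_unknown[filename] = sum(
--             value for name, value in installer_map.items() if name.lower() == "unknown"
--         )
--
--     return (
--         downloads_all,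
--         downloads_pip,
--         downloads_uv,
--         downloads_excluded_browser,
--         downloads_excluded_unknown,
--     )
-- ===== SOURCE B (Python) =====
-- def aggregate_from_installer_downloads(downloads_by_installer):
--     downloads_all = {}
--     downloads_pip = {}
--     downloads_uv = {}
--     downloads_excluded_browser = {}
--     downloads_excluded_unknown = {}
--
--     for filename, installer_map in downloads_by_installer.items():
--         t_all = t_pip = t_uv = t_browser = t_unknown = 0
--         for name, value in installer_map.items():
--             low = name.lower()
--             if low == "browser":
--                 t_browser += value
--             elif low == "unknown":
--                 t_unknown += value
--             else:
--                 t_all += value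
--                 if name == "pip":
--                     t_pip = value
--                 elif name == "uv":
--                     t_uv = value
--         downloads_all[filename] = t_all
--         downloads_pip[filename] = t_pip
--         downloads_uv[filename] = t_uv
--         downloads_excluded_browser[filename] = t_browser
--         downloads_excluded_unknown[filename] = t_unknown
--
--     return (
--         downloads_all,
--         downloads_pip,
--         downloads_uv,
--         downloads_excluded_browser,
--         downloads_excluded_unknown,
--     )
-- ===== Notes on version B (the rewrite author's own statement) =====
-- stated objective: simpler
-- what changed: A builds a filtered dict plus three separate sum/get passes per filename; B makes a single pass over each installer map with five running totals, routing each entry by its lowercased name (browser/unknown excluded case-insensitively, pip/uv picked by exact key).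
import Mathlib
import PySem

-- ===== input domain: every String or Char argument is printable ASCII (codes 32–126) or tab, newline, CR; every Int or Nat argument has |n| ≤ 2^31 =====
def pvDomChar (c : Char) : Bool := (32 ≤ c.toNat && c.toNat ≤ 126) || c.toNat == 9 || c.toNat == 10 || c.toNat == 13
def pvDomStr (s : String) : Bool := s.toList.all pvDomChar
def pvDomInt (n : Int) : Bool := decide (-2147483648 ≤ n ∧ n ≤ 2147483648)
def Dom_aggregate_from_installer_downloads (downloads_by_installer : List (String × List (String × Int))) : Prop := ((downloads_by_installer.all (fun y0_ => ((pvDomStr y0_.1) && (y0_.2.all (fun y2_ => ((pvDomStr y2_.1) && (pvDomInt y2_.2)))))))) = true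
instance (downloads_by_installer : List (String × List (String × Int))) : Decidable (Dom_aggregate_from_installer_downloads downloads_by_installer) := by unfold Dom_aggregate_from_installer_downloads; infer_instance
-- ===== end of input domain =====

-- B replaces A's per-filename dict comprehension, sum/get passes and two generator sums by one
-- pass over the installer map with five running totals (objective: simpler single-pass decomposition).

-- ===== PORT A =====
-- IGNORED_INSTALLERS = {"browser", "unknown"}; 'name.lower() not in IGNORED_INSTALLERS'
def pvKeep (name : String) : Bool := !((["browser", "unknown"] : List String).contains (PySem.Str.lower name))

-- the per-filename body of A's loop: filtered dict comprehension, then the five values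
def pvRowA (installer_map : List (String × Int)) : Int × Int × Int × Int × Int :=
  let filtered : PySem.Dict String Int :=
    installer_map.foldl (fun f nv => if pvKeep nv.1 then f.insert nv.1 nv.2 else f) PySem.Dict.empty
  (filtered.values.sum,
   filtered.getD "pip" 0,
   filtered.getD "uv" 0,
   ((installer_map.filter (fun nv => PySem.Str.lower nv.1 == "browser")).map Prod.snd).sum,
   ((installer_map.filter (fun nv => PySem.Str.lower nv.1 == "unknown")).map Prod.snd).sum)

def aggregate_from_installer_downloads (downloads_by_installer : List (String × List (String × Int))) : (List (String × Int)) × (List (String × Int)) × (List (String × Int)) × (List (String × Int)) × (List (String × Int)) :=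
  let r := downloads_by_installer.foldl
    (fun (acc : PySem.Dict String Int × PySem.Dict String Int × PySem.Dict String Int × PySem.Dict String Int × PySem.Dict String Int) fm =>
      let t := pvRowA fm.2
      (acc.1.insert fm.1 t.1, acc.2.1.insert fm.1 t.2.1, acc.2.2.1.insert fm.1 t.2.2.1,
       acc.2.2.2.1.insert fm.1 t.2.2.2.1, acc.2.2.2.2.insert fm.1 t.2.2.2.2))
    (PySem.Dict.empty, PySem.Dict.empty, PySem.Dict.empty, PySem.Dict.empty, PySem.Dict.empty)
  (r.1.items, r.2.1.items, r.2.2.1.items, r.2.2.2.1.items, r.2.2.2.2.items)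

-- ===== PORT B =====
-- the per-filename body of B's loop: one pass, five running totals
def pvRowB (installer_map : List (String × Int)) : Int × Int × Int × Int × Int :=
  installer_map.foldl
    (fun t nv =>
      let low := PySem.Str.lower nv.1
      if low == "browser" then (t.1, t.2.1, t.2.2.1, t.2.2.2.1 + nv.2, t.2.2.2.2)
      else if low == "unknown" then (t.1, t.2.1, t.2.2.1, t.2.2.2.1, t.2.2.2.2 + nv.2)
      else if nv.1 == "pip" then (t.1 + nv.2, nv.2, t.2.2.1, t.2.2.2.1, t.2.2.2.2)
      else if nv.1 == "uv" then (t.1 + nv.2, t.2.1, nv.2, t.2.2.2.1, t.2.2.2.2)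
      else (t.1 + nv.2, t.2.1, t.2.2.1, t.2.2.2.1, t.2.2.2.2))
    (0, 0, 0, 0, 0)

def aggregate_from_installer_downloads_alt (downloads_by_installer : List (String × List (String × Int))) : (List (String × Int)) × (List (String × Int)) × (List (String × Int)) × (List (String × Int)) × (List (String × Int)) :=
  let r := downloads_by_installer.foldl
    (fun (acc : PySem.Dict String Int × PySem.Dict String Int × PySem.Dict String Int × PySem.Dict String Int × PySem.Dict String Int) fm =>
      let t := pvRowB fm.2
      (acc.1.insert fm.1 t.1, acc.2.1.insert fm.1 t.2.1, acc.2.2.1.insert fm.1 t.2.2.1,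
       acc.2.2.2.1.insert fm.1 t.2.2.2.1, acc.2.2.2.2.insert fm.1 t.2.2.2.2))
    (PySem.Dict.empty, PySem.Dict.empty, PySem.Dict.empty, PySem.Dict.empty, PySem.Dict.empty)
  (r.1.items, r.2.1.items, r.2.2.1.items, r.2.2.2.1.items, r.2.2.2.2.items)

-- ===== PRECONDITION & SPEC =====
-- Pre_ requires each inner association list to have pairwise-distinct keys, because it stands for a
-- Python dict (which cannot hold duplicate keys), so this excludes no input A actually accepts.
def Pre_aggregate_from_installer_downloads (downloads_by_installer : List (String × List (String × Int))) : Prop :=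
  ∀ p ∈ downloads_by_installer, (p.2.map Prod.fst).Nodup
instance (downloads_by_installer : List (String × List (String × Int))) : Decidable (Pre_aggregate_from_installer_downloads downloads_by_installer) := by unfold Pre_aggregate_from_installer_downloads; infer_instance

def pvWitness_aggregate_from_installer_downloads : (List (String × List (String × Int))) :=
  [("tzfpy-1.0.whl", [("pip", 3), ("Browser", 1), ("uv", 2), ("unknown", 4)]), ("tzfpy-1.0.tar.gz", [])]

def Spec_aggregate_from_installer_downloads (downloads_by_installer : List (String × List (String × Int))) (out : (List (String × Int)) × (List (String × Int)) × (List (String × Int)) × (List (String × Int)) × (List (String × Int))) : Prop := out = aggregate_from_installer_downloads_alt downloads_by_installer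
instance (downloads_by_installer : List (String × List (String × Int))) (out : (List (String × Int)) × (List (String × Int)) × (List (String × Int)) × (List (String × Int)) × (List (String × Int))) : Decidable (Spec_aggregate_from_installer_downloads downloads_by_installer out) := by
  unfold Spec_aggregate_from_installer_downloads
  exact @instDecidableEqProd _ _ _ (@instDecidableEqProd _ _ _ (@instDecidableEqProd _ _ _ (@instDecidableEqProd _ _ _ _))) _ _

-- ===== CLAIM (what is proved, stated in full; the proofs are below) =====
def Claim_equal_aggregate_from_installer_downloads : Prop := ∀ (downloads_by_installer : List (String × List (String × Int))), Dom_aggregate_from_installer_downloads downloads_by_installer → Pre_aggregate_from_installer_downloads downloads_by_installer → Spec_aggregate_from_installer_downloads downloads_by_installer (aggregate_from_installer_downloads downloads_by_installer)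

-- ===== LEMMAS AND PROOFS =====

-- closed forms shared by the two row computations
def pvSK (im : List (String × Int)) : Int := ((im.filter (fun nv => pvKeep nv.1)).map Prod.snd).sum
def pvSB (im : List (String × Int)) : Int := ((im.filter (fun nv => PySem.Str.lower nv.1 == "browser")).map Prod.snd).sum
def pvSU (im : List (String × Int)) : Int := ((im.filter (fun nv => PySem.Str.lower nv.1 == "unknown")).map Prod.snd).sum
def pvFirst (im : List (String × Int)) (k : String) (x : Int) : Int := ((im.find? (fun nv => nv.1 == k)).map Prod.snd).getD x

theorem pvRowB_char (im : List (String × Int)) (h : (im.map Prod.fst).Nodup) (t : Int × Int × Int × Int × Int) :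
    im.foldl
      (fun t nv =>
        let low := PySem.Str.lower nv.1
        if low == "browser" then (t.1, t.2.1, t.2.2.1, t.2.2.2.1 + nv.2, t.2.2.2.2)
        else if low == "unknown" then (t.1, t.2.1, t.2.2.1, t.2.2.2.1, t.2.2.2.2 + nv.2)
        else if nv.1 == "pip" then (t.1 + nv.2, nv.2, t.2.2.1, t.2.2.2.1, t.2.2.2.2)
        else if nv.1 == "uv" then (t.1 + nv.2, t.2.1, nv.2, t.2.2.2.1, t.2.2.2.2)
        else (t.1 + nv.2, t.2.1, t.2.2.1, t.2.2.2.1, t.2.2.2.2)) t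
    = (t.1 + pvSK im, pvFirst im "pip" t.2.1, pvFirst im "uv" t.2.2.1, t.2.2.2.1 + pvSB im, t.2.2.2.2 + pvSU im) := by
  induction im generalizing t with
  | nil => simp [pvSK, pvSB, pvSU, pvFirst]
  | cons nv rest ih =>
    simp only [List.map_cons, List.nodup_cons] at h
    obtain ⟨hnot, hrest⟩ := h
    have hrowrest := ih hrest
    simp only [List.foldl_cons]
    rw [hrowrest]
    by_cases hb : PySem.Str.lower nv.1 = "browser"
    · have hp : nv.1 ≠ "pip" := by intro hc; rw [hc] at hb; exact absurd hb (by decide)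
      have hu : nv.1 ≠ "uv" := by intro hc; rw [hc] at hb; exact absurd hb (by decide)
      have hk : pvKeep nv.1 = false := by simp [pvKeep, hb]
      simp [hb, hp, hu, hk, pvSK, pvSB, pvSU, pvFirst, List.filter_cons, List.find?_cons,
        add_assoc, add_comm, add_left_comm]
    · by_cases hn : PySem.Str.lower nv.1 = "unknown"
      · have hp : nv.1 ≠ "pip" := by intro hc; rw [hc] at hn; exact absurd hn (by decide)
        have hu : nv.1 ≠ "uv" := by intro hc; rw [hc] at hn; exact absurd hn (by decide)
        have hk : pvKeep nv.1 = false := by simp [pvKeep, hn]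
        simp [hb, hn, hp, hu, hk, pvSK, pvSB, pvSU, pvFirst, List.filter_cons, List.find?_cons,
          add_assoc, add_comm, add_left_comm]
      · have hk : pvKeep nv.1 = true := by simp [pvKeep, hb, hn]
        by_cases hp : nv.1 = "pip"
        · have hnone : rest.find? (fun nv' => nv'.1 == "pip") = none := by
            apply List.find?_eq_none.mpr
            intro a ha hc
            have ha1 : a.1 = nv.1 := by rw [hp]; exact beq_iff_eq.mp hc
            exact hnot (ha1 ▸ List.mem_map_of_mem (f := Prod.fst) ha)
          have hu : nv.1 ≠ "uv" := by rw [hp]; decide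
          have hlp : PySem.Str.lower "pip" = "pip" := by decide
          have hkp : pvKeep "pip" = true := by decide
          simp [hb, hn, hp, hu, hk, hnone, hlp, hkp, pvSK, pvSB, pvSU, pvFirst, List.filter_cons, List.find?_cons,
            add_assoc, add_comm, add_left_comm]
        · by_cases hu : nv.1 = "uv"
          · have hnone : rest.find? (fun nv' => nv'.1 == "uv") = none := by
              apply List.find?_eq_none.mpr
              intro a ha hc
              have ha1 : a.1 = nv.1 := by rw [hu]; exact beq_iff_eq.mp hc
              exact hnot (ha1 ▸ List.mem_map_of_mem (f := Prod.fst) ha)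
            have hlu : PySem.Str.lower "uv" = "uv" := by decide
            have hku : pvKeep "uv" = true := by decide
            simp [hb, hn, hp, hu, hk, hnone, hlu, hku, pvSK, pvSB, pvSU, pvFirst, List.filter_cons, List.find?_cons,
              add_assoc, add_comm, add_left_comm]
          · simp [hb, hn, hp, hu, hk, pvSK, pvSB, pvSU, pvFirst, List.filter_cons, List.find?_cons,
              add_assoc, add_comm, add_left_comm]

theorem pvFiltered_items (im : List (String × Int)) (h : (im.map Prod.fst).Nodup) :
    (im.foldl (fun f nv => if pvKeep nv.1 then f.insert nv.1 nv.2 else f) PySem.Dict.empty).items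
      = im.filter (fun nv => pvKeep nv.1) := by
  have h2 : (List.filter (fun nv => pvKeep nv.1) im).foldl
        (fun (f : PySem.Dict String Int) nv => f.insert nv.1 nv.2) PySem.Dict.empty
      = im.foldl (fun f nv => if pvKeep nv.1 then f.insert nv.1 nv.2 else f) PySem.Dict.empty :=
    List.foldl_filter ..
  rw [← h2, PySem.Dict.items_foldl_insert_fresh (im.filter (fun nv => pvKeep nv.1)) Prod.fst Prod.snd
    PySem.Dict.empty (by intro a _; simp) (h.sublist (List.filter_sublist.map Prod.fst))]
  simp [PySem.Dict.empty]

theorem pvGet?_mk_eq_find? (l : List (String × Int)) (k : String) :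
    (PySem.Dict.mk l).get? k = (l.find? (fun nv => nv.1 == k)).map Prod.snd := by
  induction l with
  | nil => rfl
  | cons nv rest ih =>
    rw [PySem.Dict.get?_mk_cons]
    by_cases hk : nv.1 = k
    · simp [hk, List.find?_cons]
    · have hb : (nv.1 == k) = false := by simpa using hk
      simp [hb, ih, List.find?_cons]

theorem pvFind?_filter_keep (im : List (String × Int)) (k : String) (hk : pvKeep k = true) :
    (im.filter (fun nv => pvKeep nv.1)).find? (fun nv => nv.1 == k) = im.find? (fun nv => nv.1 == k) := by
  rw [List.find?_filter]
  congr 1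
  funext a
  by_cases ha : a.1 = k <;> simp [ha, hk]

theorem pvRow_eq (im : List (String × Int)) (h : (im.map Prod.fst).Nodup) : pvRowA im = pvRowB im := by
  have hmk : (im.foldl (fun f nv => if pvKeep nv.1 then f.insert nv.1 nv.2 else f) PySem.Dict.empty)
      = PySem.Dict.mk (im.filter (fun nv => pvKeep nv.1)) := PySem.Dict.ext (pvFiltered_items im h)
  unfold pvRowA pvRowB
  rw [pvRowB_char im h]
  simp only [hmk]
  have e1 : (PySem.Dict.mk (im.filter (fun nv => pvKeep nv.1))).values.sum = (0 : Int) + pvSK im := by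
    simp [PySem.Dict.values, pvSK]
  have e2 : (PySem.Dict.mk (im.filter (fun nv => pvKeep nv.1))).getD "pip" 0 = pvFirst im "pip" 0 := by
    rw [PySem.Dict.getD_eq_get?_getD, pvGet?_mk_eq_find?, pvFind?_filter_keep im "pip" (by decide)]
    rfl
  have e3 : (PySem.Dict.mk (im.filter (fun nv => pvKeep nv.1))).getD "uv" 0 = pvFirst im "uv" 0 := by
    rw [PySem.Dict.getD_eq_get?_getD, pvGet?_mk_eq_find?, pvFind?_filter_keep im "uv" (by decide)]
    rfl
  have e4 : ((im.filter (fun nv => PySem.Str.lower nv.1 == "browser")).map Prod.snd).sum = (0 : Int) + pvSB im := by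
    simp [pvSB]
  have e5 : ((im.filter (fun nv => PySem.Str.lower nv.1 == "unknown")).map Prod.snd).sum = (0 : Int) + pvSU im := by
    simp [pvSU]
  rw [e1, e2, e3, e4, e5]

-- ===== VERDICT (by name: the statement is the Claim_ definition above) =====
theorem aggregate_from_installer_downloads_spec : Claim_equal_aggregate_from_installer_downloads := by
  intro d hdom hpre
  clear hdom
  unfold Spec_aggregate_from_installer_downloads
  unfold aggregate_from_installer_downloads aggregate_from_installer_downloads_alt
  have : ∀ (acc : PySem.Dict String Int × PySem.Dict String Int × PySem.Dict String Int × PySem.Dict String Int × PySem.Dict String Int),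
      d.foldl (fun acc fm =>
        let t := pvRowA fm.2
        (acc.1.insert fm.1 t.1, acc.2.1.insert fm.1 t.2.1, acc.2.2.1.insert fm.1 t.2.2.1,
         acc.2.2.2.1.insert fm.1 t.2.2.2.1, acc.2.2.2.2.insert fm.1 t.2.2.2.2)) acc
      = d.foldl (fun acc fm =>
        let t := pvRowB fm.2
        (acc.1.insert fm.1 t.1, acc.2.1.insert fm.1 t.2.1, acc.2.2.1.insert fm.1 t.2.2.1,
         acc.2.2.2.1.insert fm.1 t.2.2.2.1, acc.2.2.2.2.insert fm.1 t.2.2.2.2)) acc := by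
    induction d with
    | nil => intro acc; rfl
    | cons fm rest ih =>
      intro acc
      simp only [List.foldl_cons]
      rw [pvRow_eq fm.2 (hpre fm (by simp))]
      exact ih (fun p hp => hpre p (List.mem_cons_of_mem _ hp)) _
  simp only [this]
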